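-- pv_equiv track=rewrite | github.com/MartinFrankeFMn/AdventOfCode | 2025/aoc06_1.py | split_numbers
-- ===== SOURCE A (Python) =====
-- def split_numbers(numbers: list[str]):
--     result = []
--     for number in numbers:
--         if number.strip() == '':
--             yield result
--             result = []
--             continue
--         result.append(int(number))
--     if result:
--         yield result
-- ===== SOURCE B (Python) =====
-- def split_numbers(numbers: list[str]):
--     start = 0
--     for i, number in enumerate(numbers):
--         if number.strip() == '':
--             yield [int(x) for x in numbers[start:i]]
--             start = i + 1
--     tail = numbers[start:]
--     if tail:
--         yield [int(x) for x in tail]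
-- ===== Notes on version B (the rewrite author's own statement) =====
-- stated objective: alternative
-- what changed: B drops A's running accumulator list entirely: it tracks only an integer start index and produces each group as a slice numbers[start:i] converted in one comprehension at each blank (and the tail slice at the end), instead of appending converted ints element by element.
import Mathlib
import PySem

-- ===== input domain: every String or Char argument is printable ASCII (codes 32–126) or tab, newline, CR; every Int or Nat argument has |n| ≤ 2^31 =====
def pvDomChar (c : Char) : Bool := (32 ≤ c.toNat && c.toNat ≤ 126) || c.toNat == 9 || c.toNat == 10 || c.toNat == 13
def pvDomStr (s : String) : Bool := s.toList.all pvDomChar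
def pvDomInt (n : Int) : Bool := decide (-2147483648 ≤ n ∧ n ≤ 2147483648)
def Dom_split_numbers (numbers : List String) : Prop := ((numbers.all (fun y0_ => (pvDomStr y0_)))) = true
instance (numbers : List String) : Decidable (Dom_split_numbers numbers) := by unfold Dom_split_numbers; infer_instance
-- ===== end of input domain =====

-- B replaces A's running accumulator list with a start index and produces each group
-- as a slice converted in one comprehension (alternative decomposition, same cost).
-- A is a generator; the ports model the full list of yielded values.


-- ===== PORT A =====
-- int(x); under Pre_ every converted string parses, so getD 0 is never the default
def pvInt (s : String) : Int := (PySem.Int.ofStr? s).getD 0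

def split_numbers (numbers : List String) : List (List Int) :=
  let st := numbers.foldl
    (fun (st : List Int × List (List Int)) number =>
      if PySem.Str.strip number = "" then ([], st.2 ++ [st.1])
      else (st.1 ++ [pvInt number], st.2))
    ([], [])
  if st.1.isEmpty then st.2 else st.2 ++ [st.1]

-- ===== PORT B =====
def split_numbers_alt (numbers : List String) : List (List Int) :=
  let st := (PySem.List.enumerate numbers 0).foldl
    (fun (st : Int × List (List Int)) p =>
      if PySem.Str.strip p.2 = "" then
        (p.1 + 1, st.2 ++ [(PySem.List.slice numbers (some st.1) (some p.1)).map pvInt])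
      else st)
    (0, [])
  let tail := PySem.List.slice numbers (some st.1) none
  if tail.isEmpty then st.2 else st.2 ++ [tail.map pvInt]

-- ===== PRECONDITION & SPEC =====
-- Pre_ excludes exactly the inputs where Python's int() raises ValueError:
-- a non-blank element that is not an int literal.
def Pre_split_numbers (numbers : List String) : Prop :=
  ∀ s ∈ numbers, PySem.Str.strip s = "" ∨ (PySem.Int.ofStr? s).isSome
instance (numbers : List String) : Decidable (Pre_split_numbers numbers) := by
  unfold Pre_split_numbers; infer_instance

def pvWitness_split_numbers : List String := ["1", " ", "-2", " 7 ", "", "3"]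

def Spec_split_numbers (numbers : List String) (out : List (List Int)) : Prop := out = split_numbers_alt numbers
instance (numbers : List String) (out : List (List Int)) : Decidable (Spec_split_numbers numbers out) := by unfold Spec_split_numbers; infer_instance

-- ===== CLAIM (what is proved, stated in full; the proofs are below) =====
def Claim_equal_split_numbers : Prop := ∀ (numbers : List String), Dom_split_numbers numbers → Pre_split_numbers numbers → Spec_split_numbers numbers (split_numbers numbers)

-- ===== LEMMAS AND PROOFS =====

-- finalization step of A: flush the last group if nonempty
def pvFinA (st : List Int × List (List Int)) : List (List Int) :=
  if st.1.isEmpty then st.2 else st.2 ++ [st.1]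

-- finalization step of B: convert the tail slice if nonempty
def pvFinB (numbers : List String) (st : Int × List (List Int)) : List (List Int) :=
  let tail := PySem.List.slice numbers (some st.1) none
  if tail.isEmpty then st.2 else st.2 ++ [tail.map pvInt]

def pvStepA (st : List Int × List (List Int)) (number : String) : List Int × List (List Int) :=
  if PySem.Str.strip number = "" then ([], st.2 ++ [st.1])
  else (st.1 ++ [pvInt number], st.2)

def pvStepB (numbers : List String) (st : Int × List (List Int)) (p : Int × String) :
    Int × List (List Int) :=
  if PySem.Str.strip p.2 = "" then
    (p.1 + 1, st.2 ++ [(PySem.List.slice numbers (some st.1) (some p.1)).map pvInt])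
  else st

lemma pv_slice_succ (numbers : List String) (start i : Nat)
    (hsi : start ≤ i) (hi : i < numbers.length) :
    PySem.List.slice numbers (some (start : Int)) (some ((i : Int) + 1)) =
      PySem.List.slice numbers (some (start : Int)) (some (i : Int)) ++ [numbers[i]] := by
  have h1 : ((i : Int) + 1) = ((i + 1 : Nat) : Int) := by push_cast; ring
  rw [h1, PySem.List.slice_natCast, PySem.List.slice_natCast]
  have h2 : i + 1 - start = (i - start) + 1 := by omega
  rw [h2, List.take_add_one]
  have h3 : (numbers.drop start)[i - start]? = some numbers[i] := by
    rw [List.getElem?_drop]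
    have : start + (i - start) = i := by omega
    rw [this, List.getElem?_eq_getElem hi]
  simp [h3]

lemma pv_main (numbers : List String) : ∀ (ys : List String) (i start : Nat) (acc : List (List Int)),
    ys = numbers.drop i → start ≤ i → i ≤ numbers.length →
    pvFinA (ys.foldl pvStepA ((PySem.List.slice numbers (some (start : Int)) (some (i : Int))).map pvInt, acc)) =
      pvFinB numbers ((PySem.List.enumerate ys (i : Int)).foldl (pvStepB numbers) ((start : Int), acc)) := by
  intro ys
  induction ys with
  | nil =>
    intro i start acc hys hsi hil
    have hi : numbers.length ≤ i := by
      by_contra h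
      have := List.drop_eq_nil_iff.mp hys.symm
      omega
    have hslice : PySem.List.slice numbers (some (start : Int)) (some (i : Int)) = numbers.drop start := by
      rw [PySem.List.slice_natCast]
      exact List.take_of_length_le (by simp; omega)
    simp only [PySem.List.enumerate_nil, List.foldl_nil, pvFinA, pvFinB,
      PySem.List.slice_from_natCast, hslice]
    cases h : (numbers.drop start).isEmpty <;> simp_all
  | cons y ys ih =>
    intro i start acc hys hsi hil
    have hi : i < numbers.length := by
      by_contra h
      have : numbers.drop i = [] := List.drop_eq_nil_iff.mpr (by omega)
      simp [this] at hys
    have hy : numbers[i] = y := by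
      have := hys
      have h1 : (numbers.drop i)[0]? = some y := by rw [← this]; rfl
      rw [List.getElem?_drop, Nat.add_zero, List.getElem?_eq_getElem hi] at h1
      exact Option.some.inj h1
    have hys' : ys = numbers.drop (i + 1) := by
      have h1 : (numbers.drop i).tail = numbers.drop (i + 1) := by
        rw [List.tail_drop]
      rw [← hys] at h1; simpa using h1
    rw [PySem.List.enumerate_cons, List.foldl_cons, List.foldl_cons]
    by_cases hb : PySem.Str.strip y = ""
    · simp only [pvStepA, pvStepB, hb, if_pos]
      have h1 : ((i : Int) + 1) = ((i + 1 : Nat) : Int) := by push_cast; ring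
      have hempty : PySem.List.slice numbers (some ((i + 1 : Nat) : Int)) (some ((i + 1 : Nat) : Int)) = ([] : List String) := by
        rw [PySem.List.slice_natCast]; simp
      have := ih (i + 1) (i + 1) (acc ++ [(PySem.List.slice numbers (some (start : Int)) (some (i : Int))).map pvInt]) hys' (le_refl _) (by omega)
      rw [hempty, List.map_nil] at this
      rw [h1]
      exact this
    · simp only [pvStepA, pvStepB, hb, if_neg, not_false_iff]
      have := ih (i + 1) start acc hys' (by omega) (by omega)
      have h1 : ((i : Int) + 1) = ((i + 1 : Nat) : Int) := by push_cast; ring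
      rw [h1]
      rw [← this]
      congr 2
      rw [← h1, pv_slice_succ numbers start i hsi hi, hy, List.map_append]
      simp

-- ===== VERDICT (by name: the statement is the Claim_ definition above) =====
theorem split_numbers_spec : Claim_equal_split_numbers := by
  intro numbers _ _
  unfold Spec_split_numbers split_numbers split_numbers_alt
  have := pv_main numbers numbers 0 0 [] (by simp) (le_refl _) (by simp)
  have hs : PySem.List.slice numbers (some ((0 : Nat) : Int)) (some ((0 : Nat) : Int)) = ([] : List String) := by
    rw [PySem.List.slice_natCast]; simp
  rw [hs] at this
  simpa [pvFinA, pvFinB, pvStepA, pvStepB] using this
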